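-- pv_equiv track=rewrite | github.com/Guthers/audio2txt | run.py | add_lines
-- ===== SOURCE A (Python) =====
-- def add_lines(txt):
--     words = txt.split(" ")
--     count = 0
--     ll = 20
--     result = ""
--     for w in words:
--         result += w + " "
--         count += 1
--         if count == ll:
--             result += "\n"
--             count = 0
--
--     return result
-- ===== SOURCE B (Python) =====
-- def add_lines(txt):
--     words = txt.split(" ")
--     pieces = []
--     i = 0
--     n = len(words)
--     while i < n:
--         group = words[i:i + 20]
--         pieces.append(" ".join(group) + " ")
--         if len(group) == 20:
--             pieces.append("\n")
--         i += 20
--     return "".join(pieces)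
-- ===== Notes on version B (the rewrite author's own statement) =====
-- stated objective: alternative
-- what changed: The per-word counter loop with repeated string concatenation is replaced by a block-wise pass: slice the word list into 20-word chunks, join each chunk once, and emit a newline exactly for full chunks.
import Mathlib
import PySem

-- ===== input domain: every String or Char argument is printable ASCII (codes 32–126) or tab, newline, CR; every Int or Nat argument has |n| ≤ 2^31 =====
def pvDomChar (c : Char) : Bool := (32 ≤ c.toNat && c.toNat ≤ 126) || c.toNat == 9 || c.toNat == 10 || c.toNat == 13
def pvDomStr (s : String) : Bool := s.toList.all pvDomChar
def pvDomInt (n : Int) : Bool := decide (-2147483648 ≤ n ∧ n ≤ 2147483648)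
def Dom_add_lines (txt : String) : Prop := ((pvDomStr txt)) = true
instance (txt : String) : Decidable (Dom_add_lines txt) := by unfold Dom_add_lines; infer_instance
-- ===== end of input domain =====

-- B replaces A's per-word counter loop (string concatenation word by word) by a
-- block-wise pass over 20-word chunks, joining each chunk once; same return value.


-- ===== PORT A =====
-- the 'for w in words' loop of A, carrying (count, result); ll = 20
def addLinesGo : List String → Int → String → String
  | [], _, result => result
  | w :: ws, count, result =>
      let result' := result ++ w ++ " "
      let count' := count + 1
      if count' == 20 then addLinesGo ws 0 (result' ++ "\n")
      else addLinesGo ws count' result'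

def add_lines (txt : String) : String :=
  addLinesGo ((PySem.Str.split? txt " ").getD []) 0 ""

-- ===== PORT B =====
-- B's 'while i < n' loop: one step per 20-word chunk of the remaining words
def addLinesChunks : List String → String
  | [] => ""
  | w :: ws =>
      let group := (w :: ws).take 20
      PySem.Str.join " " group ++ " " ++
        (if group.length == 20 then "\n" else "") ++
        addLinesChunks ((w :: ws).drop 20)
  termination_by ws => ws.length
  decreasing_by simp

def add_lines_alt (txt : String) : String :=
  addLinesChunks ((PySem.Str.split? txt " ").getD [])

-- ===== PRECONDITION & SPEC =====
def Spec_add_lines (txt : String) (out : String) : Prop := out = add_lines_alt txt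
instance (txt : String) (out : String) : Decidable (Spec_add_lines txt out) := by unfold Spec_add_lines; infer_instance

-- ===== CLAIM (what is proved, stated in full; the proofs are below) =====
def Claim_equal_add_lines : Prop := ∀ (txt : String), Dom_add_lines txt → Spec_add_lines txt (add_lines txt)

-- ===== LEMMAS AND PROOFS =====

-- concat of (w ++ " ") over a word list; the common middle ground of both loops
def joinSp : List String → String
  | [] => ""
  | w :: ws => w ++ " " ++ joinSp ws

-- A's loop, re-expressed with the remaining capacity k = 20 - count
def glue : Nat → List String → String
  | _, [] => ""
  | k, w :: ws => w ++ " " ++ (if k = 1 then "\n" ++ glue 20 ws else glue (k - 1) ws)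

theorem glue_nil (k : Nat) : glue k [] = "" := rfl

theorem glue_cons (k : Nat) (w : String) (ws : List String) :
    glue k (w :: ws) = w ++ " " ++ (if k = 1 then "\n" ++ glue 20 ws else glue (k - 1) ws) := rfl

theorem chunks_nil : addLinesChunks [] = "" := by rw [addLinesChunks]

theorem chunks_cons (w : String) (ws : List String) : addLinesChunks (w :: ws) =
    PySem.Str.join " " ((w :: ws).take 20) ++ " " ++
      (if ((w :: ws).take 20).length == 20 then "\n" else "") ++
      addLinesChunks ((w :: ws).drop 20) := by rw [addLinesChunks]

theorem join_sp (g : List String) (w : String) :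
    PySem.Str.join " " (w :: g) ++ " " = joinSp (w :: g) := by
  induction g generalizing w with
  | nil =>
    apply String.toList_injective
    simp [PySem.Str.join, joinSp, PySem.Chars.join_singleton]
  | cons b l ih =>
    have h : PySem.Str.join " " (w :: b :: l) = w ++ " " ++ PySem.Str.join " " (b :: l) := by
      apply String.toList_injective
      simp [PySem.Str.join, PySem.Chars.join_cons_cons]
    rw [h, joinSp, String.append_assoc, ih]

theorem addGo_glue (ws : List String) :
    ∀ (k : Nat) (r : String), 1 ≤ k → k ≤ 20 →
      addLinesGo ws (20 - (k : Int)) r = r ++ glue k ws := by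
  induction ws with
  | nil => intro k r _ _; simp [addLinesGo, glue_nil]
  | cons w ws ih =>
    intro k r hk1 hk20
    by_cases hk : k = 1
    · subst hk
      have hz : (0 : Int) = 20 - ((20 : Nat) : Int) := by norm_num
      simp only [addLinesGo]
      rw [if_pos (by decide), hz, ih 20 _ (by norm_num) (le_refl 20)]
      simp [glue_cons, String.append_assoc]
      rw [← String.append_assoc]
      rfl
    · have hne : ¬ ((20 - (k : Int) + 1) == 20) = true := by
        simp only [beq_iff_eq]
        omega
      simp only [addLinesGo]
      rw [if_neg hne]
      have hc : (20 : Int) - (k : Int) + 1 = 20 - ((k - 1 : Nat) : Int) := by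
        push_cast [Nat.cast_sub hk1]; ring
      rw [hc, ih (k - 1) _ (by omega) (by omega)]
      simp [glue_cons, hk, String.append_assoc]

theorem glue_split (ws : List String) :
    ∀ (k : Nat) (w : String), 1 ≤ k →
      glue k (w :: ws) = joinSp ((w :: ws).take k) ++
        ((if ((w :: ws).take k).length = k then "\n" else "") ++ glue 20 ((w :: ws).drop k)) := by
  induction ws with
  | nil =>
    intro k w hk1
    obtain ⟨m, rfl⟩ : ∃ m, k = m + 1 := ⟨k - 1, by omega⟩
    rw [glue_cons]
    by_cases hm : m = 0
    · subst hm
      simp [joinSp, String.append_assoc]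
    · rw [if_neg (by omega)]
      simp [joinSp, glue_nil, hm]
  | cons b l ih =>
    intro k w hk1
    obtain ⟨m, rfl⟩ : ∃ m, k = m + 1 := ⟨k - 1, by omega⟩
    rw [glue_cons]
    by_cases hm : m = 0
    · subst hm
      simp [joinSp, String.append_assoc]
    · rw [if_neg (by omega)]
      obtain ⟨m', rfl⟩ : ∃ m', m = m' + 1 := ⟨m - 1, by omega⟩
      rw [show m' + 1 + 1 - 1 = m' + 1 from rfl, ih (m' + 1) b (by omega)]
      simp only [List.take_succ_cons, List.drop_succ_cons, joinSp, List.length_cons]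
      simp only [show (((List.take m' l).length + 1 + 1 = m' + 1 + 1)) ↔
        (((List.take m' l).length + 1 = m' + 1)) from by omega]
      simp [String.append_assoc]

theorem glue20_eq (ws : List String) : glue 20 ws = addLinesChunks ws := by
  match ws with
  | [] => rw [glue_nil, chunks_nil]
  | w :: ws =>
    have ih := glue20_eq ((w :: ws).drop 20)
    rw [glue_split ws 20 w (by norm_num), ih, chunks_cons]
    rw [show (w :: ws).take 20 = w :: ws.take 19 from rfl, ← join_sp (ws.take 19) w]
    simp [String.append_assoc, beq_iff_eq]
  termination_by ws.length
  decreasing_by simp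

-- ===== VERDICT (by name: the statement is the Claim_ definition above) =====
theorem add_lines_spec : Claim_equal_add_lines := by
  intro txt _
  unfold Spec_add_lines add_lines add_lines_alt
  have h0 : (0 : Int) = 20 - ((20 : Nat) : Int) := by norm_num
  rw [h0, addGo_glue _ 20 "" (by norm_num) (le_refl 20), glue20_eq]
  simp
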